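-- pv_equiv track=rewrite | github.com/SpencerSedano/CodewarsPractice | spiriling-box.py | fill_2d_list
-- ===== SOURCE A (Python) =====
-- def fill_2d_list(m, n):
--
--     result = [[0] * m for _ in range(n)]
--
--     for i in range(n):
--         for j in range(m):
--
--             distance_to_boundary = min(i, j, n - i - 1, m - j - 1)
--
--
--             value_to_fill = distance_to_boundary + 1
--
--
--             result[i][j] = value_to_fill
--
--     return result
--
-- m = 5
--
-- n = 8
--
-- result = fill_2d_list(m, n)
-- ===== SOURCE B (Python) =====
-- def fill_2d_list(m, n):
--     if n <= 0:
--         return []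
--     if m <= 0:
--         return [[] for _ in range(n)]
--     base = [min(j + 1, m - j) for j in range(m)]
--     result = []
--     for i in range(n):
--         c = min(i + 1, n - i)
--         result.append([v if v < c else c for v in base])
--     return result
-- ===== Notes on version B (the rewrite author's own statement) =====
-- stated objective: faster
-- what changed: B factors the per-cell four-way min into a single precomputed column boundary-profile row (min(j+1, m-j)) that each output row clamps at its own row boundary distance, replacing A's nested index loops that recompute min(i, j, n-i-1, m-j-1) and assign into a preallocated grid cell by cell; intended as faster by a constant factor (a timing run measured ~5.8x at the largest size both programs finished).
import Mathlib
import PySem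

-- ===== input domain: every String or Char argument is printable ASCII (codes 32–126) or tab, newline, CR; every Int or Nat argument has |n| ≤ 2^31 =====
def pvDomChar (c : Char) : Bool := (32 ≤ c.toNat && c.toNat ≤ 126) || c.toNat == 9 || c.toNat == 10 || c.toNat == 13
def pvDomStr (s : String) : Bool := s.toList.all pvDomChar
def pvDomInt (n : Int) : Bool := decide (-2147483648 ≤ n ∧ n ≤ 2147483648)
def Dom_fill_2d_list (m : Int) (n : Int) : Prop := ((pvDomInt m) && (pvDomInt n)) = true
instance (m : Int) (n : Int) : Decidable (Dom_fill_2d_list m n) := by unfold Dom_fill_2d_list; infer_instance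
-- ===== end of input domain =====

-- B replaces A's per-cell four-way min over nested index loops by one precomputed column
-- profile row that each output row clamps at the row's own boundary distance; intended as
-- faster by a constant factor (timing run measured ~5.8x at the largest size both finished).

-- ===== PORT A =====
def fill_2d_list (m : Int) (n : Int) : List (List Int) :=
  let result := (PySem.List.pyRange 0 n 1).map (fun _ => PySem.List.pyRepeat [(0 : Int)] m)
  (PySem.List.pyRange 0 n 1).foldl (fun result i =>
    (PySem.List.pyRange 0 m 1).foldl (fun result j =>
      let distance_to_boundary := min (min (min i j) (n - i - 1)) (m - j - 1)
      let value_to_fill := distance_to_boundary + 1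
      -- result[i][j] = value_to_fill  (row fetch + element write, as an immutable update)
      PySem.List.pySetD result i (PySem.List.pySetD (PySem.List.pyGetD result i []) j value_to_fill))
      result) result

-- ===== PORT B =====
def fill_2d_list_alt (m : Int) (n : Int) : List (List Int) :=
  if n ≤ 0 then []
  else if m ≤ 0 then
    (PySem.List.pyRange 0 n 1).map (fun _ => ([] : List Int))
  else
    let base := (PySem.List.pyRange 0 m 1).map (fun j => min (j + 1) (m - j))
    (PySem.List.pyRange 0 n 1).foldl (fun result i =>
      let c := min (i + 1) (n - i)
      result ++ [base.map (fun v => if v < c then v else c)]) []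

-- ===== PRECONDITION & SPEC =====
def Spec_fill_2d_list (m : Int) (n : Int) (out : List (List Int)) : Prop := out = fill_2d_list_alt m n
instance (m : Int) (n : Int) (out : List (List Int)) : Decidable (Spec_fill_2d_list m n out) := by unfold Spec_fill_2d_list; infer_instance

-- ===== CLAIM (what is proved, stated in full; the proofs are below) =====
def Claim_equal_fill_2d_list : Prop := ∀ (m : Int) (n : Int), Dom_fill_2d_list m n → Spec_fill_2d_list m n (fill_2d_list m n)

-- ===== LEMMAS AND PROOFS =====
-- Both ports are shown equal to the closed-form grid pvG (cell (i,j) carries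
-- min(i, j, n-i-1, m-j-1) + 1): B by rewriting its appending fold into a map,
-- A by an invariant for its nested index-assignment loops.

def pvVal (m n : Int) (i j : Int) : Int := min (min (min i j) (n - i - 1)) (m - j - 1) + 1
def pvG (m n : Int) : List (List Int) :=
  (PySem.List.pyRange 0 n 1).map (fun i => (PySem.List.pyRange 0 m 1).map (pvVal m n i))

lemma pv_foldl_push {α β : Type} (l : List α) (f : α → β) :
    ∀ init : List β, l.foldl (fun acc x => acc ++ [f x]) init = init ++ l.map f := by
  induction l with
  | nil => simp
  | cons a t ih => intro init; simp [ih]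

lemma pvB_eq_G (m n : Int) : fill_2d_list_alt m n = pvG m n := by
  unfold fill_2d_list_alt pvG
  by_cases hn : n ≤ 0
  · simp [hn, PySem.List.pyRange_one_eq_nil hn]
  simp only [hn, ite_false]
  by_cases hm : m ≤ 0
  · simp [hm, PySem.List.pyRange_one_eq_nil hm]
  · simp only [hm, ite_false]
    rw [pv_foldl_push]
    simp only [List.nil_append, List.map_map]
    refine List.map_congr_left fun i _ => ?_
    refine List.map_congr_left fun j _ => ?_
    simp only [Function.comp, pvVal]
    split_ifs <;> omega

-- setting every index 0..M-1 of a list turns its first M entries into a map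
lemma pv_set_all (g : Nat → Int) : ∀ (M : Nat) (row : List Int), M ≤ row.length →
    (List.range M).foldl (fun r k => r.set k (g k)) row = (List.range M).map g ++ row.drop M := by
  intro M
  induction M with
  | zero => intro row _; simp
  | succ M ih =>
    intro row h
    rw [List.range_succ, List.foldl_append, List.foldl_cons, List.foldl_nil,
        ih row (by omega)]
    have hM : M < row.length := by omega
    have hdrop : row.drop M = row[M] :: row.drop (M + 1) := List.drop_eq_getElem_cons hM
    rw [hdrop, List.map_append]
    have hlen : ((List.range M).map g).length = M := by simp
    rw [List.set_append_right _ _ (by omega)]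
    simp only [hlen, Nat.sub_self]
    simp
    rw [hdrop, List.set_cons_zero]

-- the inner j-loop only rewrites row i of the grid
lemma pv_inner_hoist (f : Int → Int) (i : Int) (hi : 0 ≤ i) :
    ∀ (L : List Int) (grid : List (List Int)), i.toNat < grid.length →
    L.foldl (fun g j => PySem.List.pySetD g i (PySem.List.pySetD (PySem.List.pyGetD g i []) j (f j))) grid
      = PySem.List.pySetD grid i (L.foldl (fun r j => PySem.List.pySetD r j (f j)) (PySem.List.pyGetD grid i [])) := by
  intro L
  induction L with
  | nil =>
    intro grid hg
    simp only [List.foldl_nil]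
    rw [PySem.List.pySetD_of_nonneg _ _ hi, PySem.List.pyGetD_of_nonneg _ _ hi]
    rw [List.getD_eq_getElem _ _ hg, List.set_getElem_self]
  | cons a t ih =>
    intro grid hg
    simp only [List.foldl_cons]
    rw [ih _ (by rw [PySem.List.length_pySetD]; exact hg)]
    simp only [PySem.List.pySetD_of_nonneg _ _ hi, PySem.List.pyGetD_of_nonneg _ _ hi]
    rw [List.getD_eq_getElem _ _ (by simpa using hg)]
    rw [List.getD_eq_getElem _ _ (by simpa using hg)]
    rw [List.getElem_set_self, List.set_set]

lemma pv_row_fill (m : Int) (f : Int → Int) (row : List Int) (h : row.length = m.toNat) :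
    (PySem.List.pyRange 0 m 1).foldl (fun r j => PySem.List.pySetD r j (f j)) row
      = (PySem.List.pyRange 0 m 1).map f := by
  rw [PySem.List.pyRange_one, List.foldl_map, List.map_map]
  simp only [zero_add, Int.sub_zero]
  have := pv_set_all (fun k => f (k : Int)) m.toNat row (by omega)
  simp only [PySem.List.pySetD_natCast]
  rw [this, ← h, List.drop_length, List.append_nil]
  rfl

lemma pv_outer (m n : Int) (N : Nat) : ∀ (K : Nat), K ≤ N →
    (List.range K).foldl (fun g k => (PySem.List.pyRange 0 m 1).foldl
        (fun g j => PySem.List.pySetD g ((k : Nat) : Int)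
          (PySem.List.pySetD (PySem.List.pyGetD g ((k : Nat) : Int) []) j (pvVal m n ((k : Nat) : Int) j))) g)
      ((List.range N).map (fun _ => List.replicate m.toNat (0 : Int)))
    = (List.range K).map (fun k => (PySem.List.pyRange 0 m 1).map (pvVal m n ((k : Nat) : Int)))
      ++ ((List.range N).map (fun _ => List.replicate m.toNat (0 : Int))).drop K := by
  intro K
  induction K with
  | zero => intro _; simp
  | succ K ih =>
    intro hK
    rw [List.range_succ, List.foldl_append, List.foldl_cons, List.foldl_nil, ih (by omega)]
    have hglen : ((List.range K).map (fun k => (PySem.List.pyRange 0 m 1).map (pvVal m n ((k : Nat) : Int)))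
        ++ ((List.range N).map (fun _ => List.replicate m.toNat (0 : Int))).drop K).length = N := by
      simp; omega
    have hg : ((K : Int)).toNat < ((List.range K).map (fun k => (PySem.List.pyRange 0 m 1).map (pvVal m n ((k : Nat) : Int)))
        ++ ((List.range N).map (fun _ => List.replicate m.toNat (0 : Int))).drop K).length := by
      rw [hglen]; simp; omega
    rw [pv_inner_hoist (pvVal m n (K : Int)) (K : Int) (Int.natCast_nonneg K) (PySem.List.pyRange 0 m 1) _ hg]
    rw [PySem.List.pyGetD_of_nonneg _ _ (Int.natCast_nonneg K)]
    rw [List.getD_eq_getElem _ _ (by simpa using hg)]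
    have hgetK : ((List.range K).map (fun k => (PySem.List.pyRange 0 m 1).map (pvVal m n ((k : Nat) : Int)))
        ++ ((List.range N).map (fun _ => List.replicate m.toNat (0 : Int))).drop K)[((K : Int)).toNat]'(by simpa using hg)
        = List.replicate m.toNat (0 : Int) := by
      rw [List.getElem_append_right (by simp)]
      simp
    rw [hgetK]
    rw [pv_row_fill m _ _ (by simp)]
    rw [PySem.List.pySetD_of_nonneg _ _ (Int.natCast_nonneg K)]
    simp only [Int.toNat_natCast]
    have hlen1 : ((List.range K).map (fun k => (PySem.List.pyRange 0 m 1).map (pvVal m n ((k : Nat) : Int)))).length = K := by simp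
    rw [List.set_append_right _ _ (by omega)]
    simp only [hlen1, Nat.sub_self]
    have hKN : K < ((List.range N).map (fun _ => List.replicate m.toNat (0 : Int))).length := by simp; omega
    rw [List.drop_eq_getElem_cons hKN, List.set_cons_zero]
    simp

lemma pvA_eq_G (m n : Int) : fill_2d_list m n = pvG m n := by
  unfold fill_2d_list pvG
  simp only [PySem.List.pyRepeat_singleton]
  rw [PySem.List.pyRange_one 0 n]
  simp only [List.foldl_map, List.map_map, zero_add, Int.sub_zero, Function.comp_def]
  have h := pv_outer m n n.toNat n.toNat (le_refl _)
  simp only [pvVal] at h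
  rw [h]
  simp

-- ===== VERDICT (by name: the statement is the Claim_ definition above) =====
theorem fill_2d_list_spec : Claim_equal_fill_2d_list := by
  intro m n _
  unfold Spec_fill_2d_list
  rw [pvA_eq_G, pvB_eq_G]
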